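-- pv_equiv track=rewrite | github.com/kkhuong/advantage-gambling | UTH.py | get_kicker_for_trips_using_one_hole
-- ===== SOURCE A (Python) =====
-- import collections
-- import copy
--
-- def argmin(lst, f):
--     """Returns the element e in lst for which f(e) is the minimum.
--     Runtime:
--         O(|lst|)
--
--     Args:
--         lst: List of elements
--         f: Function in which we apply to each element in lst
--
--     Example:
--         >>> argmin([9,2,3], lambda x: x**2)
--         2
--
--     Returns:
--         The element e for which f(e) is minimum
--     """
--     if len(lst) > 0:
--         mapped = [f(e) for e in lst]
--         idx = mapped.index(min(mapped))
--         return lst[idx]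
--     raise ValueError("argmin() lst is an Empty Sequence")
--
-- def rank_2_index(r):
--     """Returns the nth highest of the rank.
--     Runtime:
--         O(1)
--
--     Args:
--         r: Either the rank of the card (i.e., '2', '3', ..., 'A') or the
--         actual card (e.g. 'Ks')
--
--     Example:
--         >>> rank_2_index('2')
--         0
--
--         >>> rank_2_index('A')
--         12
--
--         Because Deuce is the lowest rank card and Ace is the highest rank card
--
--     Returns:
--         The number of ranks below r.
--     """
--     ranks = '23456789TJQKA'
--     return ranks.index(r[0]) # just in case they have a suit
--
-- def get_kicker_for_trips_using_one_hole(hand, board):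
--     """Kicker
--     Assumption:
--         There is at least a pair on board. You have trips (or even 'two trips').
--         We are only using one of two hole to build the trips.
--
--     Args:
--         hand: A list containing 2 cards (string representation)
--         board: A list containing (up to 5) cards (string representation)
--
--     Returns:
--         A character representing a rank.
--     """
--     # find the pair(s) on board
--     rank_count = collections.Counter()
--     for c in board:
--         rank_count[c[0]] += 1
--
--     possible_pairs = []
--     for rnk, occurrence in rank_count.items():
--         if occurrence >= 2:
--             possible_pairs.append(rnk)
--
--     # remove that from hand, remaining is the kicker
--     possible_kickers = []
--     hand_copy = copy.deepcopy(hand)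
--     for r in possible_pairs:
--         if r == hand[0][0]:
--             possible_kickers.append(hand[1][0])
--         elif r == hand[1][0]:
--             possible_kickers.append(hand[0][0])
--
--     if len(possible_kickers) > 0:
--         return argmin(possible_kickers, rank_2_index)
--     else:
--         return '2'
-- ===== SOURCE B (Python) =====
-- def get_kicker_for_trips_using_one_hole(hand, board):
--     r0, r1 = hand[0][0], hand[1][0]
--     p0 = sum(c[0] == r0 for c in board) >= 2
--     p1 = sum(c[0] == r1 for c in board) >= 2
--     for r in '23456789TJQKA':
--         if (p0 and r == r1) or (p1 and r == r0):
--             return r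
--     return '2'
-- ===== Notes on version B (the rewrite author's own statement) =====
-- stated objective: simpler
-- what changed: B drops A's Counter/pair-list/kicker-list/argmin pipeline entirely: it tests each hole rank's board count against 2 once, then scans the thirteen ranks '2'..'A' in ascending order and returns the first rank that is a kicker (so no minimum ever has to be computed).
-- outside the precondition, e.g. on get_kicker_for_trips_using_one_hole([], []): A returns '2', B raises IndexError; on get_kicker_for_trips_using_one_hole(['', 'Kd'], ['2c']): A returns '2', B raises IndexError
import Mathlib
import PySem

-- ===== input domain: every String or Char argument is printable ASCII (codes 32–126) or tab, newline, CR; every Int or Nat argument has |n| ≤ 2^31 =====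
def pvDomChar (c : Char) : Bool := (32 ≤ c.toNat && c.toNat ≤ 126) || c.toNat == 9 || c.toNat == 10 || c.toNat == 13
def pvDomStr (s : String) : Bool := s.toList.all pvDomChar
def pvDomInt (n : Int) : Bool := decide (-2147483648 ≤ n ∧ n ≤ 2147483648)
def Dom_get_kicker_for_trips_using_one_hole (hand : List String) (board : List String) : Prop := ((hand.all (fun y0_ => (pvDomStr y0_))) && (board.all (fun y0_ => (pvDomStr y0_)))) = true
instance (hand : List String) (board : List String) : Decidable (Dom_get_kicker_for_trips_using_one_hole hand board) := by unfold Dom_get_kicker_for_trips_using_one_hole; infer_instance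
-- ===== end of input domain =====

-- B replaces A's Counter/pair-list/kicker-list/argmin pipeline by a direct scan of the thirteen
-- ranks in ascending order, returning the first rank that is a kicker; objective: simpler.

-- ===== PORT A =====
-- shared card helper: s[0] (the ' ' default is unreachable: Pre_ admits only inputs where the
-- string is known nonempty wherever this is applied)
def pvFst (s : String) : Char := (PySem.Str.pyGet? s 0).getD ' '

-- port of rank_2_index: '23456789TJQKA'.index(r[0]); char-level index is exact for the 1-char
-- strings this is applied to; the defaults (None / not-found ValueError) are unreachable under Pre_
def rank_2_index (r : String) : Int :=
  (((PySem.Str.pyGet? r 0).bind (fun c => PySem.List.index? "23456789TJQKA".toList c)).map Int.ofNat).getD 0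

-- port of argmin: lst[mapped.index(min(mapped))]; the ' ' / 0 defaults cover only the empty list,
-- where Python raises ValueError (unreachable under Pre_, argmin is only called on a nonempty list)
def pvArgmin (lst : List Char) (f : Char → Int) : Char :=
  if lst.length > 0 then
    let mapped := lst.map f
    let mn := (PySem.List.min? mapped (fun x => x)).getD 0
    let idx := (PySem.List.index? mapped mn).getD 0
    lst.getD idx ' '
  else ' '

-- port of A (the unused 'hand_copy = copy.deepcopy(hand)' has no effect on the result and is dropped)
def get_kicker_for_trips_using_one_hole (hand : List String) (board : List String) : String :=
  let rank_count := board.foldl (fun (d : PySem.Dict Char Int) c => d.modify (pvFst c) 0 (· + 1)) PySem.Dict.empty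
  let possible_pairs := rank_count.items.foldl (fun acc p => if p.2 ≥ 2 then acc ++ [p.1] else acc) ([] : List Char)
  let possible_kickers := possible_pairs.foldl (fun acc r =>
      if r = pvFst (PySem.List.pyGetD hand 0 "") then acc ++ [pvFst (PySem.List.pyGetD hand 1 "")]
      else if r = pvFst (PySem.List.pyGetD hand 1 "") then acc ++ [pvFst (PySem.List.pyGetD hand 0 "")]
      else acc) ([] : List Char)
  if possible_kickers.length > 0 then
    String.ofList [pvArgmin possible_kickers (fun c => rank_2_index (String.ofList [c]))]
  else "2"

-- ===== PORT B =====
-- sum(c[0] == rX for c in board) ported as a fold adding the 0/1 indicator;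
-- the for-loop over '23456789TJQKA' with an early return ported as List.find?
def get_kicker_for_trips_using_one_hole_alt (hand : List String) (board : List String) : String :=
  let r0 := pvFst (PySem.List.pyGetD hand 0 "")
  let r1 := pvFst (PySem.List.pyGetD hand 1 "")
  let p0 : Bool := decide (2 ≤ board.foldl (fun (s : Int) c => s + (if pvFst c = r0 then 1 else 0)) 0)
  let p1 : Bool := decide (2 ≤ board.foldl (fun (s : Int) c => s + (if pvFst c = r1 then 1 else 0)) 0)
  match "23456789TJQKA".toList.find? (fun r => (p0 && r == r1) || (p1 && r == r0)) with
  | some r => String.ofList [r]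
  | none => "2"

-- ===== PRECONDITION & SPEC =====
-- Pre_ restricts to the function's natural domain (a hand of at least two nonempty cards: A itself
-- reads hand[0][0] and hand[1][0] whenever the board carries a pair) and excludes the inputs on
-- which A raises: a deficient hand when the board has a pair (IndexError), an empty board card
-- (IndexError), and a hole card matched to a board pair whose partner's rank character is outside
-- '23456789TJQKA' (ValueError in rank_2_index).  When the board has NO pair A happens to return '2'
-- even for a deficient hand because it never touches the hand; those degenerate inputs are excluded
-- too (B always reads both hole cards), see the cited examples.
def Pre_get_kicker_for_trips_using_one_hole (hand : List String) (board : List String) : Prop :=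
  2 ≤ hand.length ∧
  PySem.List.pyGetD hand 0 "" ≠ "" ∧
  PySem.List.pyGetD hand 1 "" ≠ "" ∧
  (∀ c ∈ board, c ≠ "") ∧
  (2 ≤ (board.map pvFst).count (pvFst (PySem.List.pyGetD hand 0 "")) →
     pvFst (PySem.List.pyGetD hand 1 "") ∈ "23456789TJQKA".toList) ∧
  (2 ≤ (board.map pvFst).count (pvFst (PySem.List.pyGetD hand 1 "")) →
     pvFst (PySem.List.pyGetD hand 0 "") ∈ "23456789TJQKA".toList)
instance (hand : List String) (board : List String) : Decidable (Pre_get_kicker_for_trips_using_one_hole hand board) := by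
  unfold Pre_get_kicker_for_trips_using_one_hole; infer_instance

def pvWitness_get_kicker_for_trips_using_one_hole : List String × List String :=
  (["7s", "Kd"], ["7h", "7d", "2c"])

def Spec_get_kicker_for_trips_using_one_hole (hand : List String) (board : List String) (out : String) : Prop := out = get_kicker_for_trips_using_one_hole_alt hand board
instance (hand : List String) (board : List String) (out : String) : Decidable (Spec_get_kicker_for_trips_using_one_hole hand board out) := by unfold Spec_get_kicker_for_trips_using_one_hole; infer_instance

-- ===== CLAIM (what is proved, stated in full; the proofs are below) =====
def Claim_equal_get_kicker_for_trips_using_one_hole : Prop := ∀ (hand : List String) (board : List String), Dom_get_kicker_for_trips_using_one_hole hand board → Pre_get_kicker_for_trips_using_one_hole hand board → Spec_get_kicker_for_trips_using_one_hole hand board (get_kicker_for_trips_using_one_hole hand board)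

-- ===== LEMMAS AND PROOFS =====

-- A's kicker loop (if r == h0 … elif r == h1 …) as a filter-map
theorem kick_fold (h0 h1 : Char) (l : List Char) (acc : List Char) :
    l.foldl (fun acc r => if r = h0 then acc ++ [h1] else if r = h1 then acc ++ [h0] else acc) acc
      = acc ++ (l.filter (fun r => decide (r = h0 ∨ r = h1))).map (fun r => if r = h0 then h1 else h0) := by
  induction l generalizing acc with
  | nil => simp
  | cons x t ih =>
    by_cases hx0 : x = h0
    · subst hx0; simp [List.foldl_cons, ih]
    · by_cases hx1 : x = h1
      · subst hx1; simp [List.foldl_cons, hx0, ih]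
      · simp [List.foldl_cons, hx0, hx1, ih]

-- A's pair loop (Prop-valued if) as a filter-map
theorem pair_fold (l : List (Char × Int)) (acc : List Char) :
    l.foldl (fun acc p => if p.2 ≥ 2 then acc ++ [p.1] else acc) acc
      = acc ++ (l.filter (fun p => decide (p.2 ≥ 2))).map Prod.fst := by
  simpa using PySem.List.foldl_append_if (fun p : Char × Int => decide (p.2 ≥ 2)) Prod.fst l acc

-- the deduplicated filtered rank list A computes
def pvPairs (rl : List Char) : List Char :=
  (PySem.Set.ofList rl).filter (fun k => decide (((rl.count k : Nat) : Int) ≥ 2))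

theorem pairs_eq (rl : List Char) :
    (((PySem.Dict.counter rl).items.filter (fun p => decide (p.2 ≥ 2))).map Prod.fst) = pvPairs rl := by
  rw [PySem.Dict.items_counter, List.filter_map, List.map_map]
  simp [Function.comp_def, pvPairs]

theorem pairs_nodup (rl : List Char) : (pvPairs rl).Nodup :=
  (PySem.Set.nodup_ofList rl).filter _

theorem mem_pairs (rl : List Char) (x : Char) : x ∈ pvPairs rl ↔ 2 ≤ rl.count x := by
  unfold pvPairs
  rw [List.mem_filter]
  constructor
  · rintro ⟨-, h⟩
    simpa using of_decide_eq_true h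
  · intro h
    refine ⟨(PySem.Set.mem_ofList rl x).2 (List.count_pos_iff.1 (by omega)), by simpa using h⟩

-- a Nodup list filtered to one element
theorem filter1 (h0 : Char) (l : List Char) (nd : l.Nodup) :
    (h0 ∈ l ∧ l.filter (fun r => decide (r = h0)) = [h0]) ∨
    (h0 ∉ l ∧ l.filter (fun r => decide (r = h0)) = []) := by
  induction l with
  | nil => simp
  | cons x t ih =>
    rcases List.nodup_cons.1 nd with ⟨hx, ndt⟩
    rcases ih ndt with ⟨hm, he⟩ | ⟨hm, he⟩
    · have hxh : x ≠ h0 := fun h => hx (h ▸ hm)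
      left; exact ⟨List.mem_cons_of_mem _ hm, by simp only [List.filter_cons, he]; simp [hxh]⟩
    · by_cases hxh : x = h0
      · subst hxh; left
        exact ⟨List.mem_cons_self, by simp only [List.filter_cons, he]; simp⟩
      · right
        refine ⟨by simp [List.mem_cons, hm, Ne.symm hxh], by simp only [List.filter_cons, he]; simp [hxh]⟩

-- a Nodup list filtered to two distinct elements
theorem filter2 (h0 h1 : Char) (hne : h0 ≠ h1) (l : List Char) (nd : l.Nodup) :
    (h0 ∉ l ∧ h1 ∉ l ∧ l.filter (fun r => decide (r = h0 ∨ r = h1)) = []) ∨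
    (h0 ∈ l ∧ h1 ∉ l ∧ l.filter (fun r => decide (r = h0 ∨ r = h1)) = [h0]) ∨
    (h0 ∉ l ∧ h1 ∈ l ∧ l.filter (fun r => decide (r = h0 ∨ r = h1)) = [h1]) ∨
    (h0 ∈ l ∧ h1 ∈ l ∧
      (l.filter (fun r => decide (r = h0 ∨ r = h1)) = [h0, h1] ∨
       l.filter (fun r => decide (r = h0 ∨ r = h1)) = [h1, h0])) := by
  induction l with
  | nil => simp
  | cons x t ih =>
    rcases List.nodup_cons.1 nd with ⟨hx, ndt⟩
    rcases ih ndt with ⟨m0, m1, he⟩ | ⟨m0, m1, he⟩ | ⟨m0, m1, he⟩ | ⟨m0, m1, he⟩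
    · by_cases hx0 : x = h0
      · subst hx0
        exact Or.inr (Or.inl ⟨List.mem_cons_self, by simp [List.mem_cons, m1, Ne.symm hne], by simp only [List.filter_cons, he]; simp⟩)
      · by_cases hx1 : x = h1
        · subst hx1
          exact Or.inr (Or.inr (Or.inl ⟨by simp [List.mem_cons, m0, Ne.symm hx0], List.mem_cons_self,
            by simp only [List.filter_cons, he]; simp⟩))
        · exact Or.inl ⟨by simp [List.mem_cons, m0, Ne.symm hx0], by simp [List.mem_cons, m1, Ne.symm hx1],
            by simp only [List.filter_cons, he]; simp [hx0, hx1]⟩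
    · have hx0 : x ≠ h0 := fun h => hx (h ▸ m0)
      by_cases hx1 : x = h1
      · subst hx1
        exact Or.inr (Or.inr (Or.inr ⟨List.mem_cons_of_mem _ m0, List.mem_cons_self,
          Or.inr (by simp only [List.filter_cons, he]; simp)⟩))
      · exact Or.inr (Or.inl ⟨List.mem_cons_of_mem _ m0, by simp [List.mem_cons, m1, Ne.symm hx1],
          by simp only [List.filter_cons, he]; simp [hx0, hx1]⟩)
    · have hx1 : x ≠ h1 := fun h => hx (h ▸ m1)
      by_cases hx0 : x = h0
      · subst hx0
        exact Or.inr (Or.inr (Or.inr ⟨List.mem_cons_self, List.mem_cons_of_mem _ m1,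
          Or.inl (by simp only [List.filter_cons, he]; simp)⟩))
      · exact Or.inr (Or.inr (Or.inl ⟨by simp [List.mem_cons, m0, Ne.symm hx0], List.mem_cons_of_mem _ m1,
          by simp only [List.filter_cons, he]; simp [hx0, hx1]⟩))
    · have hx0 : x ≠ h0 := fun h => hx (h ▸ m0)
      have hx1 : x ≠ h1 := fun h => hx (h ▸ m1)
      exact Or.inr (Or.inr (Or.inr ⟨List.mem_cons_of_mem _ m0, List.mem_cons_of_mem _ m1,
        by rcases he with he | he <;> [left; right] <;> (simp only [List.filter_cons, he]; simp [hx0, hx1])⟩))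

-- the key function A minimises by
def pvKey (c : Char) : Int := ((PySem.List.index? "23456789TJQKA".toList c).map Int.ofNat).getD 0

theorem keyA_eq (c : Char) : rank_2_index (String.ofList [c]) = pvKey c := by
  simp [rank_2_index, pvKey, PySem.Str.pyGet?]

theorem key_eq_idxOf (x : Char) (hx : x ∈ "23456789TJQKA".toList) :
    pvKey x = ("23456789TJQKA".toList.idxOf x : Int) := by
  obtain ⟨k, hk⟩ := Option.isSome_iff_exists.1 ((PySem.List.index?_isSome_iff "23456789TJQKA".toList x).2 hx)
  have hk' := hk
  rw [PySem.List.index?_eq_idxOf?] at hk'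
  unfold pvKey
  rw [PySem.List.index?_eq_idxOf?, hk', List.idxOf_eq_getD_idxOf?, hk']
  simp

theorem key_inj (x y : Char) (hx : x ∈ "23456789TJQKA".toList) (hy : y ∈ "23456789TJQKA".toList)
    (h : pvKey x = pvKey y) : x = y := by
  obtain ⟨kx, hkx⟩ := Option.isSome_iff_exists.1 ((PySem.List.index?_isSome_iff _ _).2 hx)
  obtain ⟨ky, hky⟩ := Option.isSome_iff_exists.1 ((PySem.List.index?_isSome_iff _ _).2 hy)
  obtain ⟨hkxlt, hgx, -⟩ := PySem.List.getElem_of_index?_eq_some hkx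
  obtain ⟨hkylt, hgy, -⟩ := PySem.List.getElem_of_index?_eq_some hky
  simp only [pvKey, hkx, hky, Option.map_some, Option.getD_some] at h
  have hk : kx = ky := by simpa using h
  subst hk
  rw [← hgx, ← hgy]

theorem argmin_single (x : Char) (f : Char → Int) : pvArgmin [x] f = x := by
  simp [pvArgmin, PySem.List.min?, PySem.List.index?]

theorem argmin_pair (x y : Char) (f : Char → Int) (hne : f x ≠ f y) :
    pvArgmin [x, y] f = if f x ≤ f y then x else y := by
  have hbeq : (f x == f y) = false := by simpa using hne
  by_cases h : f x ≤ f y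
  · have hlt : ¬ f y < f x := not_lt.2 h
    simp [pvArgmin, PySem.List.min?, PySem.List.index?, List.idxOf?_cons, hlt, h]
  · have hlt : f y < f x := lt_of_not_ge h
    simp [pvArgmin, PySem.List.min?, PySem.List.index?, List.idxOf?_cons, hlt, h, hbeq]

theorem pyGetD0 (a b : String) (t : List String) : PySem.List.pyGetD (a :: b :: t) 0 "" = a := by
  simp [pysem]

theorem pyGetD1 (a b : String) (t : List String) : PySem.List.pyGetD (a :: b :: t) 1 "" = b := by
  simp [pysem]

-- A's tail: argmin over the kicker list, or '2'
def pvFinishA (ks : List Char) : String :=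
  if ks.length > 0 then String.ofList [pvArgmin ks pvKey] else "2"

-- B's tail: first rank in ascending order that is a kicker, or '2'
def pvFinishB (p0 p1 : Bool) (r0 r1 : Char) : String :=
  match "23456789TJQKA".toList.find? (fun r => (p0 && r == r1) || (p1 && r == r0)) with
  | some r => String.ofList [r]
  | none => "2"

-- A, on a hand with two cards, in filter-map normal form
theorem A_norm (a b : String) (t board : List String) :
    get_kicker_for_trips_using_one_hole (a :: b :: t) board =
      pvFinishA (((pvPairs (board.map pvFst)).filter
          (fun r => decide (r = pvFst a ∨ r = pvFst b))).map
          (fun r => if r = pvFst a then pvFst b else pvFst a)) := by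
  have hc : (List.foldl (fun (d : PySem.Dict Char Int) c => d.modify (pvFst c) 0 fun x => x + 1)
      PySem.Dict.empty board) = PySem.Dict.counter (board.map pvFst) := by
    rw [PySem.Dict.counter_eq_foldl, List.foldl_map]
  simp only [get_kicker_for_trips_using_one_hole, hc, pair_fold, List.nil_append, pairs_eq,
    pyGetD0, pyGetD1, kick_fold, keyA_eq, pvFinishA]

-- B's indicator sum equals the multiset count of the board's rank characters
theorem count_fold (x : Char) (board : List String) (acc : Int) :
    board.foldl (fun (s : Int) c => s + (if pvFst c = x then 1 else 0)) acc
      = acc + ((board.map pvFst).count x : Int) := by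
  induction board generalizing acc with
  | nil => simp
  | cons c t ih =>
    by_cases h : pvFst c = x
    · simp [List.foldl_cons, ih, h]; ring
    · simp [List.foldl_cons, ih, h]

-- B, on a hand with two cards, in normal form
theorem B_norm (a b : String) (t board : List String) :
    get_kicker_for_trips_using_one_hole_alt (a :: b :: t) board =
      pvFinishB (decide (2 ≤ (board.map pvFst).count (pvFst a)))
                (decide (2 ≤ (board.map pvFst).count (pvFst b))) (pvFst a) (pvFst b) := by
  simp only [get_kicker_for_trips_using_one_hole_alt, pyGetD0, pyGetD1, count_fold, zero_add,
    pvFinishB]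
  norm_num

-- find? of an equality test finds the element itself
theorem find_self (x : Char) (l : List Char) (hx : x ∈ l) :
    l.find? (fun r => r == x) = some x := by
  induction l with
  | nil => cases hx
  | cons h t ih =>
    by_cases hh : h = x
    · subst hh; simp
    · have hf : (h == x) = false := by simp [hh]
      have hxt : x ∈ t := by rcases List.mem_cons.1 hx with h' | h' <;> [exact absurd h'.symm hh; exact h']
      simp [hf, ih hxt]

-- find? of a two-way equality test finds the earlier of the two elements
theorem find_or (x y : Char) (l : List Char) (hne : x ≠ y) (hx : x ∈ l) (hy : y ∈ l) :
    l.find? (fun r => r == x || r == y) = some (if l.idxOf x ≤ l.idxOf y then x else y) := by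
  induction l with
  | nil => cases hx
  | cons h t ih =>
    by_cases hhx : h = x
    · subst hhx
      simp [List.idxOf_cons_self]
    · by_cases hhy : h = y
      · subst hhy
        have hxt : x ∈ t := by rcases List.mem_cons.1 hx with h' | h' <;> [exact absurd h'.symm hhx; exact h']
        have e1 : (h :: t).idxOf x = t.idxOf x + 1 := List.idxOf_cons_ne t hhx
        simp [List.idxOf_cons_self, e1]
      · have hxt : x ∈ t := by rcases List.mem_cons.1 hx with h' | h' <;> [exact absurd h'.symm hhx; exact h']
        have hyt : y ∈ t := by rcases List.mem_cons.1 hy with h' | h' <;> [exact absurd h'.symm hhy; exact h']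
        have hf : ((h == x || h == y) : Bool) = false := by simp [hhx, hhy]
        have e1 : (h :: t).idxOf x = t.idxOf x + 1 := List.idxOf_cons_ne t hhx
        have e2 : (h :: t).idxOf y = t.idxOf y + 1 := List.idxOf_cons_ne t hhy
        simp only [List.find?_cons, hf, ih hxt hyt, e1, e2, Nat.add_le_add_iff_right]

-- pvFinishB at the four boolean combinations
theorem finishB_ff (r0 r1 : Char) : pvFinishB false false r0 r1 = "2" := by
  simp [pvFinishB]

theorem finishB_tf (r0 r1 : Char) (h : r1 ∈ "23456789TJQKA".toList) :
    pvFinishB true false r0 r1 = String.ofList [r1] := by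
  have hp : (fun r : Char => (true && r == r1) || (false && r == r0)) = (fun r : Char => r == r1) := by
    funext r; simp
  simp only [pvFinishB, hp, find_self r1 _ h]

theorem finishB_ft (r0 r1 : Char) (h : r0 ∈ "23456789TJQKA".toList) :
    pvFinishB false true r0 r1 = String.ofList [r0] := by
  have hp : (fun r : Char => (true && r == r1) || (true && r == r0)) = (fun r : Char => r == r1 || r == r0) := by
    funext r; simp
  have hp' : (fun r : Char => (false && r == r1) || (true && r == r0)) = (fun r : Char => r == r0) := by
    funext r; simp
  simp only [pvFinishB, hp', find_self r0 _ h]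

theorem finishB_tt_self (r0 : Char) (h : r0 ∈ "23456789TJQKA".toList) :
    pvFinishB true true r0 r0 = String.ofList [r0] := by
  have hp : (fun r : Char => (true && r == r0) || (true && r == r0)) = (fun r : Char => r == r0) := by
    funext r; simp
  simp only [pvFinishB, hp, find_self r0 _ h]

theorem finishB_tt (r0 r1 : Char) (hne : r1 ≠ r0) (h1 : r1 ∈ "23456789TJQKA".toList)
    (h0 : r0 ∈ "23456789TJQKA".toList) :
    pvFinishB true true r0 r1 = String.ofList [if pvKey r1 ≤ pvKey r0 then r1 else r0] := by
  have hp : (fun r : Char => (true && r == r1) || (true && r == r0)) = (fun r : Char => r == r1 || r == r0) := by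
    funext r; simp
  simp only [pvFinishB, hp, find_or r1 r0 _ hne h1 h0]
  rw [key_eq_idxOf _ h1, key_eq_idxOf _ h0]
  by_cases h : "23456789TJQKA".toList.idxOf r1 ≤ "23456789TJQKA".toList.idxOf r0
  · rw [if_pos h, if_pos (by exact_mod_cast h)]
  · rw [if_neg h, if_neg (by exact_mod_cast h)]

-- A's tail on singletons and distinct-key pairs
theorem finishA1 (x : Char) : pvFinishA [x] = String.ofList [x] := by
  simp [pvFinishA, argmin_single]

theorem finishA2 (x y : Char) (hk : pvKey x ≠ pvKey y) :
    pvFinishA [x, y] = String.ofList [if pvKey x ≤ pvKey y then x else y] := by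
  simp [pvFinishA, argmin_pair _ _ _ hk]

-- ===== VERDICT (by name: the statement is the Claim_ definition above) =====
theorem get_kicker_for_trips_using_one_hole_spec : Claim_equal_get_kicker_for_trips_using_one_hole := by
  intro hand board _dom pre
  unfold Spec_get_kicker_for_trips_using_one_hole
  obtain ⟨hlen, h0ne, h1ne, hbne, hr0, hr1⟩ := pre
  match hand, hlen with
  | a :: b :: t, _ =>
  rw [pyGetD0, pyGetD1] at hr0 hr1
  rw [A_norm, B_norm]
  set rl := board.map pvFst with hrl
  set h0 := pvFst a with hh0
  set h1 := pvFst b with hh1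
  by_cases heq : h0 = h1
  · rw [← heq] at hr0 hr1 ⊢
    have hfp : (fun r => decide (r = h0 ∨ r = h0)) = fun r => decide (r = h0) := by
      funext r; simp
    by_cases c0 : 2 ≤ rl.count h0
    · have m0 : h0 ∈ pvPairs rl := (mem_pairs rl h0).2 c0
      rcases filter1 h0 (pvPairs rl) (pairs_nodup rl) with ⟨-, hFe⟩ | ⟨hm, -⟩
      · rw [hfp, hFe, decide_eq_true c0, finishB_tt_self h0 (hr0 c0)]
        simp [finishA1]
      · exact absurd m0 hm
    · have m0 : h0 ∉ pvPairs rl := fun h => c0 ((mem_pairs rl h0).1 h)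
      rcases filter1 h0 (pvPairs rl) (pairs_nodup rl) with ⟨hm, -⟩ | ⟨-, hFe⟩
      · exact absurd hm m0
      · rw [hfp, hFe, decide_eq_false c0, finishB_ff]
        simp [pvFinishA]
  · have hm0 : h0 ∈ pvPairs rl ↔ 2 ≤ rl.count h0 := mem_pairs rl h0
    have hm1 : h1 ∈ pvPairs rl ↔ 2 ≤ rl.count h1 := mem_pairs rl h1
    rcases filter2 h0 h1 heq (pvPairs rl) (pairs_nodup rl) with
      ⟨m0, m1, hFe⟩ | ⟨m0, m1, hFe⟩ | ⟨m0, m1, hFe⟩ | ⟨m0, m1, hFe⟩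
    · rw [hFe, decide_eq_false (fun c => m0 (hm0.2 c)), decide_eq_false (fun c => m1 (hm1.2 c)),
        finishB_ff]
      simp [pvFinishA]
    · have c0 := hm0.1 m0
      rw [hFe, decide_eq_true c0, decide_eq_false (fun c => m1 (hm1.2 c)), finishB_tf h0 h1 (hr0 c0)]
      simp [finishA1]
    · have c1 := hm1.1 m1
      rw [hFe, decide_eq_true c1, decide_eq_false (fun c => m0 (hm0.2 c)), finishB_ft h0 h1 (hr1 c1)]
      have e2 : (if h1 = h0 then h1 else h0) = h0 := if_neg (fun h => heq h.symm)
      simp [finishA1, e2]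
    · have c0 := hm0.1 m0
      have c1 := hm1.1 m1
      have hin1 : h1 ∈ "23456789TJQKA".toList := hr0 c0
      have hin0 : h0 ∈ "23456789TJQKA".toList := hr1 c1
      have hkne : pvKey h1 ≠ pvKey h0 := fun h => heq (key_inj h1 h0 hin1 hin0 h).symm
      rw [decide_eq_true c0, decide_eq_true c1, finishB_tt h0 h1 (Ne.symm heq) hin1 hin0]
      have e2 : (if h1 = h0 then h1 else h0) = h0 := if_neg (fun h => heq h.symm)
      rcases hFe with hFe | hFe <;> rw [hFe]
      · simp only [List.map_cons, List.map_nil, e2, if_true]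
        rw [finishA2 h1 h0 hkne]
      · simp only [List.map_cons, List.map_nil, e2, if_true]
        rw [finishA2 h0 h1 (Ne.symm hkne)]
        have ht := lt_or_gt_of_ne hkne
        by_cases h : pvKey h1 ≤ pvKey h0
        · rw [if_pos h, if_neg (by rcases ht with ht | ht; omega; omega)]
        · rw [if_neg h, if_pos (by omega)]
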